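-- pv_equiv track=rewrite | github.com/Tubbz-alt/cs340 | proj4/graph.py | make_weighted_graph
-- ===== SOURCE A (Python) =====
-- def make_weighted_graph(edges):
--   graph = {}
--   for vs, weight in edges:
--     (v1, v2) = vs
--     if not v1 in graph:
--       graph[v1] = []
--     if not v2 in graph:
--       graph[v2] = []
--     graph[v1].append((v2, weight))
--     graph[v2].append((v1, weight))
--   return graph
-- ===== SOURCE B (Python) =====
-- def make_weighted_graph(edges):
--   # Flatten-then-group: first emit both directed entries per edge, then group by source.
--   flat = []
--   for (v1, v2), weight in edges:
--     flat.append((v1, (v2, weight)))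
--     flat.append((v2, (v1, weight)))
--   graph = {}
--   for src, nb in flat:
--     graph.setdefault(src, []).append(nb)
--   return graph
-- ===== Notes on version B (the rewrite author's own statement) =====
-- stated objective: alternative
-- what changed: Replaces the fused scan (guarded dict initialisation plus two appends per edge) by a flatten-then-group pair of passes: one pass emits two directed (src, neighbor) entries per edge, a second pass groups them with setdefault.
import Mathlib
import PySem

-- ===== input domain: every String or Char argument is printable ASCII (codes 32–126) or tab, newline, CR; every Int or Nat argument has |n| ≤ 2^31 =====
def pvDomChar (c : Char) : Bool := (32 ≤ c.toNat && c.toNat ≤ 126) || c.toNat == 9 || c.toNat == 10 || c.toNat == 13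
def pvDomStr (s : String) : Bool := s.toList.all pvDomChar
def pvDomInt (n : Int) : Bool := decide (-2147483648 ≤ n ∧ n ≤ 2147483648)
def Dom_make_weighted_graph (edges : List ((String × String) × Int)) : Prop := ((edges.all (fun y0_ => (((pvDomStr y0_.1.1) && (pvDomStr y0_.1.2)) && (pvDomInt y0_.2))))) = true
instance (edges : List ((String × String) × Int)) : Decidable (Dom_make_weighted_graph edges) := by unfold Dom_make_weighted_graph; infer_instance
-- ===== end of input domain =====

-- B replaces A's fused scan by a flatten-then-group pair of passes (alternative decomposition, same cost).


-- ===== PORT A =====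
-- one loop iteration of A: guarded empty-list initialisation for both endpoints, then two appends
def pvStepA (graph : PySem.Dict String (List (String × Int)))
    (e : (String × String) × Int) : PySem.Dict String (List (String × Int)) :=
  let v1 := e.1.1
  let v2 := e.1.2
  let weight := e.2
  let graph := if graph.contains v1 then graph else graph.insert v1 []      -- if not v1 in graph: graph[v1] = []
  let graph := if graph.contains v2 then graph else graph.insert v2 []      -- if not v2 in graph: graph[v2] = []
  let graph := graph.modify v1 [] (· ++ [(v2, weight)])                     -- graph[v1].append((v2, weight))
  graph.modify v2 [] (· ++ [(v1, weight)])                                  -- graph[v2].append((v1, weight))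

def make_weighted_graph (edges : List ((String × String) × Int)) : List (String × List (String × Int)) :=
  (edges.foldl pvStepA PySem.Dict.empty).items

-- ===== PORT B =====
-- graph.setdefault(src, []).append(nb) stores f(graph.get(src, [])) with f = (· ++ [nb]): exactly Dict.modify
def pvStepB (graph : PySem.Dict String (List (String × Int)))
    (p : String × (String × Int)) : PySem.Dict String (List (String × Int)) :=
  graph.modify p.1 [] (· ++ [p.2])

def make_weighted_graph_alt (edges : List ((String × String) × Int)) : List (String × List (String × Int)) :=
  let flat := edges.flatMap (fun e => [(e.1.1, (e.1.2, e.2)), (e.1.2, (e.1.1, e.2))])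
  (flat.foldl pvStepB PySem.Dict.empty).items

-- ===== PRECONDITION & SPEC =====
def Spec_make_weighted_graph (edges : List ((String × String) × Int)) (out : List (String × List (String × Int))) : Prop := out = make_weighted_graph_alt edges
instance (edges : List ((String × String) × Int)) (out : List (String × List (String × Int))) : Decidable (Spec_make_weighted_graph edges out) := by unfold Spec_make_weighted_graph; infer_instance

-- ===== CLAIM (what is proved, stated in full; the proofs are below) =====
def Claim_equal_make_weighted_graph : Prop := ∀ (edges : List ((String × String) × Int)), Dom_make_weighted_graph edges → Spec_make_weighted_graph edges (make_weighted_graph edges)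

-- ===== LEMMAS AND PROOFS =====

-- if k is absent, the in-place-replace map over d.items is the identity
theorem pv_map_id_of_not_contains {ν : Type} (d : PySem.Dict String ν) (k : String) (v : ν)
    (h : d.contains k = false) :
    d.items.map (fun p => if p.1 == k then (k, v) else p) = d.items := by
  conv_rhs => rw [← List.map_id d.items]
  apply List.map_congr_left
  intro p hp
  have hkp : (p.1 == k) = false := by
    cases hpk : (p.1 == k)
    · rfl
    · exfalso
      have hc : d.contains k = true := by
        simp only [PySem.Dict.contains, List.any_eq_true]
        exact ⟨p, hp, hpk⟩
      rw [hc] at h; exact Bool.noConfusion h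
  simp [hkp]

-- ensure-then-modify on the SAME key collapses to a plain modify
theorem pv_ensure_modify_self (d : PySem.Dict String (List (String × Int))) (k : String)
    (f : List (String × Int) → List (String × Int)) :
    ((if d.contains k then d else d.insert k []).modify k [] f) = d.modify k [] f := by
  cases hc : d.contains k with
  | true => simp
  | false =>
    rw [if_neg (by simp)]
    rw [PySem.Dict.modify, PySem.Dict.modify, PySem.Dict.getD_insert_self,
      PySem.Dict.getD_of_not_contains d _ hc]
    apply PySem.Dict.ext
    rw [PySem.Dict.items_insert_of_contains _ _ (PySem.Dict.contains_insert_self d k []),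
      PySem.Dict.items_insert_of_not_contains _ _ hc,
      PySem.Dict.items_insert_of_not_contains _ _ hc, List.map_append,
      pv_map_id_of_not_contains d k _ hc]
    simp

-- an in-place modify on a PRESENT key commutes with ensuring a DIFFERENT key
theorem pv_ensure_modify_comm (d : PySem.Dict String (List (String × Int))) (k k' : String)
    (hne : k ≠ k') (hk : d.contains k = true)
    (f : List (String × Int) → List (String × Int)) :
    ((if d.contains k' then d else d.insert k' []).modify k [] f)
      = (if (d.modify k [] f).contains k' then d.modify k [] f
         else (d.modify k [] f).insert k' []) := by
  have hbne : (k' == k) = false := by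
    cases hb : (k' == k)
    · rfl
    · exact absurd (beq_iff_eq.mp hb).symm hne
  have hcm : (d.modify k [] f).contains k' = d.contains k' := by
    rw [PySem.Dict.contains_modify, hbne, Bool.false_or]
  cases hc : d.contains k' with
  | true => simp [hcm, hc]
  | false =>
    rw [if_neg (by simp), if_neg (by simp [hcm, hc])]
    rw [PySem.Dict.modify, PySem.Dict.modify,
      PySem.Dict.getD_insert_of_ne d _ _ hne]
    apply PySem.Dict.ext
    have hk2 : (d.insert k' ([] : List (String × Int))).contains k = true := by
      rw [PySem.Dict.contains_insert, hk, Bool.or_true]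
    have hkm : (d.insert k (f (d.getD k []))).contains k' = false := by
      rw [PySem.Dict.contains_insert, hbne, hc, Bool.or_false]
    rw [PySem.Dict.items_insert_of_contains _ _ hk2,
      PySem.Dict.items_insert_of_not_contains _ _ hc,
      PySem.Dict.items_insert_of_not_contains _ _ hkm,
      PySem.Dict.items_insert_of_contains _ _ hk, List.map_append]
    simp
    intro hkk
    exact absurd hkk.symm hne

-- one A-step equals the two corresponding B-steps
theorem pv_step_eq (d : PySem.Dict String (List (String × Int))) (e : (String × String) × Int) :
    pvStepA d e = pvStepB (pvStepB d (e.1.1, (e.1.2, e.2))) (e.1.2, (e.1.1, e.2)) := by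
  obtain ⟨⟨v1, v2⟩, w⟩ := e
  simp only [pvStepA, pvStepB]
  by_cases hv : v1 = v2
  · subst hv
    have h1 : ((if d.contains v1 then d else d.insert v1 []).contains v1) = true := by
      cases hc : d.contains v1
      · rw [if_neg (by simp)]; exact PySem.Dict.contains_insert_self d v1 []
      · rw [if_pos (by simp)]; exact hc
    rw [if_pos (by simp [h1])]
    rw [pv_ensure_modify_self]
  · set d1 := if d.contains v1 then d else d.insert v1 [] with hd1
    have hk1 : d1.contains v1 = true := by
      rw [hd1]
      cases hc : d.contains v1
      · rw [if_neg (by simp)]; exact PySem.Dict.contains_insert_self d v1 []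
      · rw [if_pos (by simp)]; exact hc
    rw [pv_ensure_modify_comm d1 v1 v2 hv hk1]
    rw [hd1, pv_ensure_modify_self d v1, pv_ensure_modify_self]

-- the whole folds agree from ANY start dictionary
theorem pv_fold_eq (edges : List ((String × String) × Int))
    (d : PySem.Dict String (List (String × Int))) :
    edges.foldl pvStepA d
      = (edges.flatMap (fun e => [(e.1.1, (e.1.2, e.2)), (e.1.2, (e.1.1, e.2))])).foldl pvStepB d := by
  induction edges generalizing d with
  | nil => rfl
  | cons e rest ih =>
    simp only [List.foldl_cons, List.flatMap_cons, List.foldl_append, List.foldl_cons, List.foldl_nil]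
    rw [pv_step_eq, ih]

-- ===== VERDICT (by name: the statement is the Claim_ definition above) =====
theorem make_weighted_graph_spec : Claim_equal_make_weighted_graph := by
  intro edges _
  unfold Spec_make_weighted_graph make_weighted_graph make_weighted_graph_alt
  rw [pv_fold_eq]
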